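-- pv_equiv track=rewrite | github.com/pypi-data/pypi-mirror-399 | packages/memex-md-mcp/memex_md_mcp-1.1.2.tar.gz/memex_md_mcp-1.1.2/src/memex_md_mcp/server.py | sanitize_for_fts
-- ===== SOURCE A (Python) =====
-- def sanitize_for_fts(keywords: list[str]) -> str:
--     """Sanitize keywords for FTS5 query. Strips problematic punctuation."""
--     sanitized = []
--     for kw in keywords:
--         # Replace hyphens with space, remove apostrophes and other problematic chars
--         clean = kw.replace("-", " ").replace("'", "").replace('"', "")
--         # Keep only alphanumeric and spaces
--         clean = "".join(c if c.isalnum() or c.isspace() else " " for c in clean)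
--         clean = " ".join(clean.split())  # normalize whitespace
--         if clean:
--             sanitized.append(clean)
--     return " ".join(sanitized)
-- ===== SOURCE B (Python) =====
-- def sanitize_for_fts(keywords: list[str]) -> str:
--     """Sanitize keywords for FTS5 query. Strips problematic punctuation."""
--     tokens = []
--     buf = []
--     for kw in keywords:
--         for c in kw:
--             if c == "'" or c == '"':
--                 continue  # drop quotes without ending the current word
--             if c.isalnum():
--                 buf.append(c)
--             elif buf:
--                 tokens.append("".join(buf))
--                 buf = []
--         if buf:  # flush pending word at end of each keyword
--             tokens.append("".join(buf))
--             buf = []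
--     return " ".join(tokens)
-- ===== Notes on version B (the rewrite author's own statement) =====
-- stated objective: faster
-- what changed: Replaced A's per-keyword pipeline of three string replaces, a character map, split and join by a single-pass character tokenizer that maintains one word buffer and one global token list, emitting maximal alphanumeric runs and skipping quote characters without flushing.
import Mathlib
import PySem

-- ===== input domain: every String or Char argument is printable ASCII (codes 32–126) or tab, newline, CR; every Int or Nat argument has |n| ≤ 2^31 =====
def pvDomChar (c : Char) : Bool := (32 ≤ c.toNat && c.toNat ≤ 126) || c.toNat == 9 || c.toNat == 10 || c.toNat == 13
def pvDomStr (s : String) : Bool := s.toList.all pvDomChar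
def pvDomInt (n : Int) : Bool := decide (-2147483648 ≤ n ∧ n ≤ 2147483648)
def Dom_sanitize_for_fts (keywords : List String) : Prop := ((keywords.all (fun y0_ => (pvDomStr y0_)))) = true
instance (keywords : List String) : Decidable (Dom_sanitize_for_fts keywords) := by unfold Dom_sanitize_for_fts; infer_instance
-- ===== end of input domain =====

-- B replaces A's per-keyword replace/map/split/join pipeline by a single-pass character
-- tokenizer (word buffer + token list); same return value, measured moderately faster (constant factor).

-- ===== PORT A =====
def sanitize_for_fts (keywords : List String) : String :=
  let sanitized := keywords.foldl (fun acc kw =>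
    let clean := PySem.Str.replace (PySem.Str.replace (PySem.Str.replace kw "-" " ") "'" "") "\"" ""
    let clean := PySem.Str.join "" (clean.toList.map (fun c =>
      if PySem.Str.isalnum c || PySem.Str.isspace c then String.ofList [c] else " "))
    let clean := PySem.Str.join " " (PySem.Str.split₀ clean)
    if clean ≠ "" then acc ++ [clean] else acc) []
  PySem.Str.join " " sanitized

-- ===== PORT B =====
-- one character step of the tokenizer: state = (finished tokens, current word buffer)
def pvStepB (st : List String × List Char) (c : Char) : List String × List Char :=
  if c = '\'' || c = '"' then st
  else if PySem.Str.isalnum c then (st.1, st.2 ++ [c])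
  else if st.2.isEmpty then st
  else (st.1 ++ [String.ofList st.2], [])

-- flush the pending buffer into the token list (end of a keyword)
def pvFlushB (st : List String × List Char) : List String :=
  if st.2.isEmpty then st.1 else st.1 ++ [String.ofList st.2]

def sanitize_for_fts_alt (keywords : List String) : String :=
  let st := keywords.foldl (fun st kw => (pvFlushB (kw.toList.foldl pvStepB st), [])) ([], [])
  PySem.Str.join " " st.1

-- ===== PRECONDITION & SPEC =====
def Spec_sanitize_for_fts (keywords : List String) (out : String) : Prop := out = sanitize_for_fts_alt keywords
instance (keywords : List String) (out : String) : Decidable (Spec_sanitize_for_fts keywords out) := by unfold Spec_sanitize_for_fts; infer_instance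

-- ===== CLAIM (what is proved, stated in full; the proofs are below) =====
def Claim_equal_sanitize_for_fts : Prop := ∀ (keywords : List String), Dom_sanitize_for_fts keywords → Spec_sanitize_for_fts keywords (sanitize_for_fts keywords)

-- ===== LEMMAS AND PROOFS =====

-- canonical tokenizer: maximal runs of characters satisfying p, with a pending buffer cur
def pvToks (p : Char → Bool) (cur : List Char) : List Char → List (List Char)
  | [] => if cur.isEmpty then [] else [cur]
  | c :: rest =>
      if p c then pvToks p (cur ++ [c]) rest
      else if cur.isEmpty then pvToks p [] rest
      else cur :: pvToks p [] rest

-- the "not a quote" predicate and the per-keyword token list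
def pvNQ (c : Char) : Bool := !(c == '\'' || c == '"')
def pvKwToks (kw : String) : List (List Char) :=
  pvToks PySem.Chars.isalnum [] (kw.toList.filter pvNQ)
-- per-keyword cleaned string as A produces it
def pvCleanStr (kw : String) : String := String.ofList (PySem.Chars.join [' '] (pvKwToks kw))

theorem pv_alnum_not_space (c : Char) (h : PySem.Chars.isalnum c = true) :
    PySem.Chars.isspace c = false := by
  have hb : (48 ≤ c.toNat ∧ c.toNat ≤ 57) ∨ (65 ≤ c.toNat ∧ c.toNat ≤ 90) ∨
      (97 ≤ c.toNat ∧ c.toNat ≤ 122) := by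
    simp only [PySem.Chars.isalnum, PySem.Chars.isalpha, PySem.Chars.isdigit,
      PySem.Chars.isupper, PySem.Chars.islower, Bool.or_eq_true, Bool.and_eq_true,
      decide_eq_true_eq, Char.le_def, UInt32.le_iff_toNat_le] at h
    exact h.elim (fun h' => h'.elim (fun h'' => Or.inr (Or.inl h'')) (fun h'' => Or.inr (Or.inr h'')))
      (fun h' => Or.inl h')
  simp only [PySem.Chars.isspace, Bool.or_eq_false_iff, Bool.and_eq_false_iff,
    decide_eq_false_iff_not]
  omega

theorem pv_split₀_go (cs : List Char) : ∀ (cur : List Char) (acc : List (List Char)),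
    PySem.Chars.split₀.go cs cur acc
      = acc.reverse ++ pvToks (fun c => !PySem.Chars.isspace c) cur.reverse cs := by
  induction cs with
  | nil =>
      intro cur acc
      simp only [PySem.Chars.split₀.go, pvToks]
      by_cases h : cur.isEmpty <;> simp [h]
  | cons c rest ih =>
      intro cur acc
      simp only [PySem.Chars.split₀.go, pvToks]
      by_cases hs : PySem.Chars.isspace c
      · by_cases hc : cur.isEmpty
        · have hc' : cur = [] := by simpa using hc
          simp [hs, hc', ih]
        · have h2 : ¬ cur.reverse.isEmpty := by simpa using hc
          simp [hs, hc, h2, ih]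
      · have hns : (!PySem.Chars.isspace c) = true := by simp [hs]
        rw [if_neg hs]
        beta_reduce
        rw [if_pos hns, ih (c :: cur) acc, List.reverse_cons]

theorem pv_split₀ (cs : List Char) :
    PySem.Chars.split₀ cs = pvToks (fun c => !PySem.Chars.isspace c) [] cs := by
  simpa using pv_split₀_go cs [] []

theorem pv_replace_go (q : Char) (new : List Char) :
    ∀ (fuel : Nat) (cs acc : List Char), cs.length ≤ fuel →
    PySem.Chars.replace.go [q] new fuel cs acc
      = acc.reverse ++ cs.flatMap (fun c => if c = q then new else [c]) := by
  intro fuel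
  induction fuel with
  | zero =>
      intro cs acc h
      have : cs = [] := by cases cs <;> simp_all
      subst this; simp [PySem.Chars.replace.go]
  | succ n ih =>
      intro cs acc h
      cases cs with
      | nil => simp [PySem.Chars.replace.go]
      | cons c t =>
          simp only [PySem.Chars.replace.go]
          by_cases hq : c = q
          · have hpre : List.isPrefixOf [q] (c :: t) = true := by
              simp [List.isPrefixOf, hq]
            simp only [hpre]
            rw [ih _ _ (by simpa using Nat.le_of_succ_le_succ h)]
            simp [hq]
          · have hpre : List.isPrefixOf [q] (c :: t) = false := by
              simp only [List.isPrefixOf, Bool.and_true, beq_eq_false_iff_ne, ne_eq]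
              exact fun h' => hq h'.symm
            simp only [hpre, Bool.false_eq_true, if_false]
            rw [ih _ _ (by simpa using Nat.le_of_succ_le_succ h)]
            simp [hq]

theorem pv_replace_single (cs : List Char) (q : Char) (new : List Char) :
    PySem.Chars.replace cs [q] new = cs.flatMap (fun c => if c = q then new else [c]) := by
  simp only [PySem.Chars.replace]
  rw [if_neg (by simp)]
  simpa using pv_replace_go q new cs.length cs [] le_rfl

theorem pv_replace_map (cs : List Char) (q r : Char) :
    PySem.Chars.replace cs [q] [r] = cs.map (fun c => if c = q then r else c) := by
  rw [pv_replace_single]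
  induction cs with
  | nil => rfl
  | cons c t ih => by_cases h : c = q <;> simp [h, ih]

theorem pv_replace_filter (cs : List Char) (q : Char) :
    PySem.Chars.replace cs [q] [] = cs.filter (fun c => !(c == q)) := by
  rw [pv_replace_single]
  induction cs with
  | nil => rfl
  | cons c t ih => by_cases h : c = q <;> simp [h, ih]

-- transport pvToks along a pointwise-compatible character map
theorem pv_toks_map (p q : Char → Bool) (f : Char → Char) (cs : List Char)
    (H : ∀ c ∈ cs, p (f c) = q c ∧ (q c = true → f c = c)) :
    ∀ cur, pvToks p cur (cs.map f) = pvToks q cur cs := by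
  induction cs with
  | nil => intro cur; rfl
  | cons c rest ih =>
      intro cur
      obtain ⟨h1, h2⟩ := H c (by simp)
      have ih' := ih (fun d hd => H d (by simp [hd]))
      simp only [List.map_cons, pvToks, h1]
      by_cases hq : q c = true
      · simp [hq, h2 hq, ih']
      · simp only [Bool.not_eq_true] at hq
        simp [hq, ih']

-- every emitted token is nonempty
theorem pv_toks_ne (p : Char → Bool) (cs : List Char) :
    ∀ (cur t : List Char), t ∈ pvToks p cur cs → t ≠ [] := by
  induction cs with
  | nil =>
      intro cur t ht
      simp only [pvToks] at ht
      by_cases h : cur.isEmpty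
      · simp [h] at ht
      · simp only [h, Bool.false_eq_true, if_false, List.mem_singleton] at ht
        subst ht
        simpa using h
  | cons c rest ih =>
      intro cur t ht
      simp only [pvToks] at ht
      by_cases hp : p c
      · exact ih _ t (by simpa [hp] using ht)
      · by_cases hc : cur.isEmpty
        · exact ih _ t (by simpa [hp, hc] using ht)
        · rcases (by simpa [hp, hc] using ht : t = cur ∨ t ∈ pvToks p [] rest) with h | h
          · subst h; simpa using hc
          · exact ih [] t h

-- B's character fold computes the canonical tokenizer on the quote-filtered characters
theorem pv_b_fold (cs : List Char) :
    ∀ (toks : List String) (buf : List Char),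
    pvFlushB (cs.foldl pvStepB (toks, buf))
      = toks ++ (pvToks PySem.Chars.isalnum buf (cs.filter pvNQ)).map String.ofList := by
  induction cs with
  | nil =>
      intro toks buf
      simp only [List.foldl_nil, pvFlushB, List.filter_nil, pvToks]
      by_cases h : buf.isEmpty <;> simp [h]
  | cons c rest ih =>
      intro toks buf
      by_cases hq : c = '\'' ∨ c = '"'
      · have hstep : pvStepB (toks, buf) c = (toks, buf) := by
          simp only [pvStepB]
          rw [if_pos (by rcases hq with h | h <;> simp [h])]
        have hflt : pvNQ c = false := by
          simp only [pvNQ]; rcases hq with h | h <;> simp [h]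
        simp [List.foldl_cons, hstep, hflt, ih]
      · rw [not_or] at hq
        have hbq : (c = '\'' || c = '"') = false := by
          simp [hq.1, hq.2]
        have hflt : pvNQ c = true := by simp [pvNQ, hq.1, hq.2]
        by_cases ha : PySem.Chars.isalnum c
        · have hstep : pvStepB (toks, buf) c = (toks, buf ++ [c]) := by
            simp [pvStepB, hbq, PySem.Str.isalnum, ha]
          simp [List.foldl_cons, hstep, hflt, pvToks, ha, ih]
        · by_cases hb : buf.isEmpty
          · have hbuf : buf = [] := by simpa using hb
            subst hbuf
            have hstep : pvStepB (toks, []) c = (toks, []) := by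
              simp [pvStepB, hbq, PySem.Str.isalnum, ha]
            simp [List.foldl_cons, hstep, hflt, pvToks, ha, ih]
          · have hstep : pvStepB (toks, buf) c = (toks ++ [String.ofList buf], []) := by
              simp [pvStepB, hbq, PySem.Str.isalnum, ha, hb]
            have hrt : pvToks PySem.Chars.isalnum buf (c :: List.filter pvNQ rest)
                = buf :: pvToks PySem.Chars.isalnum [] (List.filter pvNQ rest) := by
              simp only [pvToks]
              rw [if_neg (by simp [ha]), if_neg (by simp [hb])]
            simp only [List.foldl_cons, hstep, List.filter_cons, hflt, if_pos, ih, hrt,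
              List.map_cons]
            simp

-- join distributes over append of nonempty lists of tokens
theorem pv_join_append (xs ys : List (List Char)) (hy : ys ≠ []) :
    xs ≠ [] →
    PySem.Chars.join [' '] (xs ++ ys)
      = PySem.Chars.join [' '] xs ++ [' '] ++ PySem.Chars.join [' '] ys := by
  induction xs with
  | nil => intro h; exact absurd rfl h
  | cons x xs ih =>
      intro _
      cases xs with
      | nil =>
          cases ys with
          | nil => exact absurd rfl hy
          | cons y ys => simp [PySem.Chars.join_cons_cons, PySem.Chars.join_singleton]
      | cons x' xs' =>
          have hrec := ih (by simp)
          have e1 : (x :: x' :: xs') ++ ys = x :: (x' :: (xs' ++ ys)) := rfl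
          rw [e1, PySem.Chars.join_cons_cons]
          have e2 : x' :: (xs' ++ ys) = (x' :: xs') ++ ys := rfl
          rw [e2, hrec, PySem.Chars.join_cons_cons]
          simp [List.append_assoc]

theorem pv_flatten_filter (tss : List (List (List Char))) :
    (tss.filter (fun ts => !ts.isEmpty)).flatten = tss.flatten := by
  induction tss with
  | nil => rfl
  | cons ts rest ih =>
      by_cases h : ts.isEmpty
      · have : ts = [] := by simpa using h
        simp [this, ih]
      · simp [h, ih]

-- joining the per-keyword joins (empties dropped) = joining all tokens at once
theorem pv_join_join (tss : List (List (List Char))) :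
    PySem.Chars.join [' '] ((tss.filter (fun ts => !ts.isEmpty)).map (PySem.Chars.join [' ']))
      = PySem.Chars.join [' '] tss.flatten := by
  induction tss with
  | nil => rfl
  | cons ts rest ih =>
      by_cases h : ts.isEmpty
      · have : ts = [] := by simpa using h
        simp [this, ih]
      · have hts : ts ≠ [] := by simpa using h
        simp only [List.filter_cons, h, Bool.not_false, if_pos, List.map_cons, List.flatten_cons]
        by_cases hfr : rest.flatten = []
        · have h1 : rest.filter (fun ts => !ts.isEmpty) = [] := by
            by_contra hne
            rcases List.exists_mem_of_ne_nil _ hne with ⟨ts', hts'⟩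
            have hkeep := List.of_mem_filter hts'
            have hmem := List.mem_of_mem_filter hts'
            have hne' : ts' ≠ [] := by simpa using hkeep
            rcases List.exists_mem_of_ne_nil _ hne' with ⟨t, htm⟩
            have : t ∈ rest.flatten := List.mem_flatten.mpr ⟨ts', hmem, htm⟩
            simp [hfr] at this
          simp [h1, hfr, PySem.Chars.join_singleton]
        · have h2 : (rest.filter (fun ts => !ts.isEmpty)).map (PySem.Chars.join [' ']) ≠ [] := by
            simp only [ne_eq, List.map_eq_nil_iff]
            intro h1
            exact hfr (by rw [← pv_flatten_filter rest, h1]; rfl)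
          rcases hM : (rest.filter (fun ts => !ts.isEmpty)).map (PySem.Chars.join [' ']) with _ | ⟨m, M'⟩
          · exact absurd hM h2
          · rw [hM, PySem.Chars.join_cons_cons, ← hM, ih,
              pv_join_append ts rest.flatten hfr hts]

-- (ofList x = "") ↔ (x = [])
theorem pv_ofList_eq_empty (x : List Char) : String.ofList x = "" ↔ x = [] := by
  constructor
  · intro h
    have := congrArg String.toList h
    simpa using this
  · intro h; subst h; rfl

-- join of a nonempty token list is nonempty
theorem pv_join_ne (ts : List (List Char)) (hne : ∀ t ∈ ts, t ≠ []) (h : ts ≠ []) :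
    PySem.Chars.join [' '] ts ≠ [] := by
  cases ts with
  | nil => exact absurd rfl h
  | cons t ts' =>
      cases ts' with
      | nil => simpa [PySem.Chars.join_singleton] using hne t (by simp)
      | cons t' r => simp [PySem.Chars.join_cons_cons]

-- A's per-keyword cleaning chain equals the canonical per-keyword join
theorem pv_a_clean (kw : String) :
    PySem.Str.join " " (PySem.Str.split₀ (PySem.Str.join ""
      ((PySem.Str.replace (PySem.Str.replace (PySem.Str.replace kw "-" " ") "'" "") "\"" "").toList.map
        (fun c => if PySem.Str.isalnum c || PySem.Str.isspace c then String.ofList [c] else " "))))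
      = pvCleanStr kw := by
  have hy : ∀ (s : List Char), PySem.Chars.replace s ['-'] [' ']
      = s.map (fun c => if c = '-' then ' ' else c) := fun s => pv_replace_map s '-' ' '
  have hrep : (PySem.Str.replace (PySem.Str.replace (PySem.Str.replace kw "-" " ") "'" "") "\"" "").toList
      = ((kw.toList.map (fun c => if c = '-' then ' ' else c)).filter
          (fun c => !(c == '\''))).filter (fun c => !(c == '"')) := by
    have t1 : ("-" : String).toList = ['-'] := rfl
    have t2 : (" " : String).toList = [' '] := rfl
    have t3 : ("'" : String).toList = ['\''] := rfl
    have t4 : ("\"" : String).toList = ['"'] := rfl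
    have t5 : ("" : String).toList = [] := rfl
    simp only [PySem.Str.replace, String.toList_ofList, t1, t2, t3, t4, t5, hy,
      pv_replace_filter]
  rw [hrep]
  set hyf : Char → Char := fun c => if c = '-' then ' ' else c with hhyf
  set ff : Char → Char := fun c =>
    if PySem.Chars.isalnum c || PySem.Chars.isspace c then c else ' ' with hff
  have hds : ∀ (cs : List Char),
      ((cs.map hyf).filter (fun c => !(c == '\''))).filter (fun c => !(c == '"'))
      = (cs.filter pvNQ).map hyf := by
    intro cs
    induction cs with
    | nil => rfl
    | cons c t iht =>
        simp only [List.map_cons, List.filter_cons]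
        have hq1 : (hyf c == '\'') = (c == '\'') := by
          rw [hhyf]
          by_cases h : c = '-'
          · subst h; decide
          · simp [h]
        have hq2 : (hyf c == '"') = (c == '"') := by
          rw [hhyf]
          by_cases h : c = '-'
          · subst h; decide
          · simp [h]
        have hnq : pvNQ c = (!(c == '\'') && !(c == '"')) := by
          simp [pvNQ, Bool.not_or]
        cases hb1 : (c == '\'') <;> cases hb2 : (c == '"') <;>
          simp [hq1, hq2, hnq, hb1, hb2, iht]
  rw [hds]
  have hmapsing : ((kw.toList.filter pvNQ).map hyf).map
      (fun c => if PySem.Str.isalnum c || PySem.Str.isspace c then String.ofList [c] else " ")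
      = (((kw.toList.filter pvNQ).map hyf).map ff).map (fun c => String.ofList [c]) := by
    simp only [List.map_map]
    apply List.map_congr_left
    intro c _
    simp only [Function.comp, hff, PySem.Str.isalnum, PySem.Str.isspace]
    by_cases h : PySem.Chars.isalnum (hyf c) = true ∨ PySem.Chars.isspace (hyf c) = true <;>
      simp [h]
  rw [hmapsing]
  have hjoin0 : (PySem.Str.join ""
      ((((kw.toList.filter pvNQ).map hyf).map ff).map (fun c => String.ofList [c]))).toList
      = ((kw.toList.filter pvNQ).map hyf).map ff := by
    simp only [PySem.Str.join, String.toList_ofList, List.map_map]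
    have e0 : ("" : String).toList = ([] : List Char) := rfl
    rw [e0]
    have e1 : (String.toList ∘ (fun c => String.ofList [c]) ∘ ff ∘ hyf)
        = (fun x => [x]) ∘ (ff ∘ hyf) := by
      funext c; simp
    rw [e1, ← List.map_map]
    rw [PySem.Chars.join_nil_singletons]
  have hsplit : PySem.Str.split₀ (PySem.Str.join ""
      ((((kw.toList.filter pvNQ).map hyf).map ff).map (fun c => String.ofList [c])))
      = (pvToks PySem.Chars.isalnum [] (kw.toList.filter pvNQ)).map String.ofList := by
    simp only [PySem.Str.split₀]
    rw [hjoin0, pv_split₀]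
    refine congrArg (List.map String.ofList) ?_
    rw [List.map_map]
    rw [pv_toks_map (fun c => !PySem.Chars.isspace c) PySem.Chars.isalnum (ff ∘ hyf) _ ?_ []]
    intro c _
    constructor
    · simp only [Function.comp]
      by_cases ha : PySem.Chars.isalnum c
      · have hc : c ≠ '-' := by
          rintro rfl; revert ha; decide
        have h1 : hyf c = c := by simp [hhyf, hc]
        rw [h1]
        have h2 : ff c = c := by simp [hff, ha]
        rw [h2, pv_alnum_not_space c ha, ha]
        rfl
      · have h3 : PySem.Chars.isspace (ff (hyf c)) = true := by
          by_cases hd : c = '-'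
          · subst hd; decide
          · have h1 : hyf c = c := by simp [hhyf, hd]
            rw [h1]
            by_cases hs : PySem.Chars.isspace c
            · simp [hff, hs]
            · simp only [hff]
              rw [if_neg (by simp [ha, hs])]
              decide
        rw [h3]
        simp [ha]
    · intro h
      simp only [Function.comp]
      have hc : c ≠ '-' := by
        rintro rfl; revert h; decide
      have h1 : hyf c = c := by simp [hhyf, hc]
      rw [h1]
      simp [hff, h]
  rw [hsplit]
  simp only [PySem.Str.join, pvCleanStr, pvKwToks, List.map_map]
  have hco : (String.toList ∘ String.ofList) = id := by funext x; simp
  rw [hco, List.map_id]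
  have hsep : (" " : String).toList = [' '] := rfl
  rw [hsep]

-- A's keyword loop collects the nonempty cleaned strings
theorem pv_a_fold (kws : List String) : ∀ (acc : List String),
    kws.foldl (fun acc kw =>
      let clean := PySem.Str.replace (PySem.Str.replace (PySem.Str.replace kw "-" " ") "'" "") "\"" ""
      let clean := PySem.Str.join "" (clean.toList.map (fun c =>
        if PySem.Str.isalnum c || PySem.Str.isspace c then String.ofList [c] else " "))
      let clean := PySem.Str.join " " (PySem.Str.split₀ clean)
      if clean ≠ "" then acc ++ [clean] else acc) acc
    = acc ++ (kws.map pvCleanStr).filter (fun s => !(s == "")) := by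
  induction kws with
  | nil => intro acc; simp
  | cons kw rest ih =>
      intro acc
      simp only [List.foldl_cons, List.map_cons, List.filter_cons]
      rw [pv_a_clean kw] at *
      by_cases h : pvCleanStr kw = ""
      · simp only [h, ne_eq, not_true_eq_false, if_false, ih]
        simp
      · simp only [ne_eq, h, not_false_eq_true, if_pos, ih]
        have : (!(pvCleanStr kw == "")) = true := by simpa using h
        simp [this]

-- B's keyword loop collects all tokens of all keywords
theorem pv_b_outer (kws : List String) : ∀ (toks : List String),
    kws.foldl (fun st kw => (pvFlushB (kw.toList.foldl pvStepB st), [])) (toks, [])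
      = (toks ++ ((kws.map pvKwToks).flatten).map String.ofList, []) := by
  induction kws with
  | nil => intro toks; simp
  | cons kw rest ih =>
      intro toks
      simp only [List.foldl_cons]
      rw [pv_b_fold kw.toList toks []]
      rw [ih]
      simp [pvKwToks]

theorem pv_main (kws : List String) : sanitize_for_fts kws = sanitize_for_fts_alt kws := by
  unfold sanitize_for_fts sanitize_for_fts_alt
  rw [pv_a_fold kws [], pv_b_outer kws]
  simp only [List.nil_append]
  -- both sides to Chars level
  simp only [PySem.Str.join, List.map_map]
  have hco : (String.toList ∘ String.ofList) = id := by funext x; simp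
  rw [hco, List.map_id]
  congr 1
  -- A side: push toList through, align the filters
  rw [List.filter_map]
  have hcongr : kws.filter ((fun s => !(s == "")) ∘ pvCleanStr)
      = kws.filter (fun kw => !(pvKwToks kw).isEmpty) := by
    apply List.filter_congr
    intro kw _
    simp only [Function.comp]
    by_cases h : pvKwToks kw = []
    · simp [pvCleanStr, h, PySem.Chars.join_nil]
    · have hne : PySem.Chars.join [' '] (pvKwToks kw) ≠ [] :=
        pv_join_ne _ (fun t ht => pv_toks_ne _ _ _ t ht) h
      have h1 : ¬ (pvCleanStr kw = "") := by
        simp only [pvCleanStr, pv_ofList_eq_empty]; exact hne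
      have e1 : (pvCleanStr kw == "") = false := by simpa using h1
      have e2 : (pvKwToks kw).isEmpty = false := by simpa using h
      rw [e1, e2]
  rw [hcongr]
  have hmt : (kws.filter (fun kw => !(pvKwToks kw).isEmpty)).map (String.toList ∘ pvCleanStr)
      = (kws.filter (fun kw => !(pvKwToks kw).isEmpty)).map
          (fun kw => PySem.Chars.join [' '] (pvKwToks kw)) := by
    apply List.map_congr_left
    intro kw _
    simp [Function.comp, pvCleanStr]
  rw [List.map_map, hmt]
  have hfm : (kws.filter (fun kw => !(pvKwToks kw).isEmpty)).map
        (fun kw => PySem.Chars.join [' '] (pvKwToks kw))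
      = ((kws.map pvKwToks).filter (fun ts => !ts.isEmpty)).map (PySem.Chars.join [' ']) := by
    rw [List.filter_map, List.map_map]
    rfl
  have hsep : (" " : String).toList = [' '] := rfl
  rw [hfm, hsep, pv_join_join]

-- ===== VERDICT (by name: the statement is the Claim_ definition above) =====
theorem sanitize_for_fts_spec : Claim_equal_sanitize_for_fts := by
  intro kws _
  unfold Spec_sanitize_for_fts
  exact pv_main kws
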